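-- pv_equiv track=rewrite | github.com/RickAvv/Shut-the-box | Prob_best_strategy.py | greater_than
-- ===== SOURCE A (Python) =====
-- def greater_than(a,b):
--     if a == []:
--         return False
--     else:
--         if b == []:
--             return True
--     a1 = [i for i in a]
--     b1 = [i for i in b]
--     ma = max(a1)
--     mb = max(b1)
--     if ma > mb:
--         return True
--     if ma == mb:
--         a1.remove(ma)
--         b1.remove(mb)
--         return greater_than(a1,b1)
--     else:
--         return False
-- ===== SOURCE B (Python) =====
-- def greater_than(a, b):
--     return sorted(a, reverse=True) > sorted(b, reverse=True)
-- ===== Notes on version B (the rewrite author's own statement) =====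
-- stated objective: faster
-- what changed: A repeatedly scans both lists for their max and removes it (quadratic recursion); B sorts both lists descending once and compares them with Python's lexicographic list ordering.
import Mathlib
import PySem

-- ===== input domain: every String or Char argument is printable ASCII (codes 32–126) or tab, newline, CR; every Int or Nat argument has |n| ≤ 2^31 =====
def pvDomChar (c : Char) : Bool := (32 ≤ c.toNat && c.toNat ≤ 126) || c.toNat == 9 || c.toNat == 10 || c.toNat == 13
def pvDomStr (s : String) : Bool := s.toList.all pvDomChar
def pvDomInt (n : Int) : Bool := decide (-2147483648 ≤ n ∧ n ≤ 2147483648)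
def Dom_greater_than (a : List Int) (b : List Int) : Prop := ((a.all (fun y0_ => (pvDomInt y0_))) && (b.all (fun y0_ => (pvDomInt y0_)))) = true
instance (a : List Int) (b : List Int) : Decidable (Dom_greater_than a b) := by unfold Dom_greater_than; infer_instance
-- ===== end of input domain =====

-- B replaces A's quadratic remove-the-max recursion by sorting both lists descending once
-- and comparing them with Python's lexicographic list '>' (objective: faster, O(n log n)).

-- ===== PORT A =====
-- literal transliteration of A: copy the lists, take max of each, compare, remove and recurse
def greater_than (a : List Int) (b : List Int) : Bool :=
  if a = [] then false
  else if b = [] then true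
  else
    let a1 := a.map (fun i => i)
    let b1 := b.map (fun i => i)
    match h1 : PySem.List.max? a1 (fun x => x), PySem.List.max? b1 (fun x => x) with
    | some ma, some mb =>
      if ma > mb then true
      else if ma = mb then
        match h3 : PySem.List.remove? a1 ma, PySem.List.remove? b1 mb with
        | some a2, some b2 => greater_than a2 b2
        | _, _ => false   -- unreachable: ma ∈ a1, mb ∈ b1
      else false
    | _, _ => false       -- unreachable: a1, b1 nonempty
termination_by a.length
decreasing_by
  have ha1 : a1 = a := by simp [a1]
  have hmem : ma ∈ a1 := PySem.List.max?_mem h1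
  have hrem : PySem.List.remove? a1 ma = some (a1.erase ma) :=
    PySem.List.remove?_eq_some_erase a1 ma hmem
  have ha2 : a2 = a1.erase ma := by rw [hrem] at h3; exact (Option.some.injEq _ _).mp h3.symm
  have hpos : 0 < a.length := by
    rcases a with _ | ⟨x, t⟩ <;> simp_all
  have hle : (a1.erase ma).length = a1.length - 1 := List.length_erase_of_mem hmem
  rw [ha2, ha1] at *
  omega

-- ===== PORT B =====
-- Python's '>' on lists of ints: lexicographic, longer wins on an equal prefix
def pyListGt : List Int → List Int → Bool
  | [], _ => false
  | _ :: _, [] => true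
  | x :: xs, y :: ys => if x > y then true else if x < y then false else pyListGt xs ys

def greater_than_alt (a : List Int) (b : List Int) : Bool :=
  pyListGt (PySem.List.sorted a (fun x => x) true) (PySem.List.sorted b (fun x => x) true)

-- ===== PRECONDITION & SPEC =====
def Spec_greater_than (a : List Int) (b : List Int) (out : Bool) : Prop := out = greater_than_alt a b
instance (a : List Int) (b : List Int) (out : Bool) : Decidable (Spec_greater_than a b out) := by unfold Spec_greater_than; infer_instance

-- ===== CLAIM (what is proved, stated in full; the proofs are below) =====
def Claim_equal_greater_than : Prop := ∀ (a : List Int) (b : List Int), Dom_greater_than a b → Spec_greater_than a b (greater_than a b)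

-- ===== LEMMAS AND PROOFS =====

-- descending sort of a nonempty list = its max consed on the descending sort of the list with
-- one occurrence of the max removed
theorem sortD_cons_max (a : List Int) (m : Int)
    (h : PySem.List.max? a (fun x => x) = some m) :
    PySem.List.sorted a (fun x => x) true = m :: PySem.List.sorted (a.erase m) (fun x => x) true := by
  have hm : m ∈ a := PySem.List.max?_mem h
  have hmax : ∀ y ∈ a, y ≤ m := fun y hy => PySem.List.max?_isMax h y hy
  have hperm1 : (PySem.List.sorted a (fun x => x) true).Perm a := PySem.List.sorted_perm ..
  have hperm2 : (m :: PySem.List.sorted (a.erase m) (fun x => x) true).Perm a := by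
    have : (PySem.List.sorted (a.erase m) (fun x => x) true).Perm (a.erase m) :=
      PySem.List.sorted_perm ..
    exact (List.Perm.cons m this).trans (List.perm_cons_erase hm).symm
  have hs1 : (PySem.List.sorted a (fun x => x) true).Pairwise (fun x y => y ≤ x) :=
    PySem.List.sorted_pairwise_rev ..
  have hs2 : (m :: PySem.List.sorted (a.erase m) (fun x => x) true).Pairwise (fun x y => y ≤ x) := by
    refine List.pairwise_cons.mpr ⟨?_, PySem.List.sorted_pairwise_rev ..⟩
    intro y hy
    have : y ∈ a.erase m := (PySem.List.mem_sorted ..).mp hy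
    exact hmax y (List.mem_of_mem_erase this)
  exact (hperm1.trans hperm2.symm).eq_of_pairwise
    (fun x y _ _ hxy hyx => le_antisymm hyx hxy) hs1 hs2

theorem greater_than_eq_pyListGt :
    ∀ (n : Nat) (a b : List Int), a.length = n →
      greater_than a b
        = pyListGt (PySem.List.sorted a (fun x => x) true) (PySem.List.sorted b (fun x => x) true) := by
  intro n
  induction n with
  | zero =>
    intro a b hn
    have ha : a = [] := List.length_eq_zero_iff.mp hn
    subst ha
    rw [greater_than.eq_def]
    simp [pyListGt, PySem.List.sorted]
  | succ k ih =>
    intro a b hn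
    have ha : a ≠ [] := by intro h; subst h; simp at hn
    by_cases hb : b = []
    · subst hb
      rw [greater_than.eq_def]
      obtain ⟨m, hm⟩ : ∃ m, PySem.List.max? a (fun x => x) = some m := by
        rcases a with _ | ⟨x, t⟩
        · exact absurd rfl ha
        · exact ⟨t.foldl max x, PySem.List.max?_id_cons ..⟩
      rw [sortD_cons_max a m hm]
      simp [ha, pyListGt, PySem.List.sorted]
    · -- both nonempty
      obtain ⟨ma, hma⟩ : ∃ m, PySem.List.max? a (fun x => x) = some m := by
        rcases a with _ | ⟨x, t⟩
        · exact absurd rfl ha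
        · exact ⟨t.foldl max x, PySem.List.max?_id_cons ..⟩
      obtain ⟨mb, hmb⟩ : ∃ m, PySem.List.max? b (fun x => x) = some m := by
        rcases b with _ | ⟨x, t⟩
        · exact absurd rfl hb
        · exact ⟨t.foldl max x, PySem.List.max?_id_cons ..⟩
      have hra : PySem.List.remove? a ma = some (a.erase ma) :=
        PySem.List.remove?_eq_some_erase a ma (PySem.List.max?_mem hma)
      have hrb : PySem.List.remove? b mb = some (b.erase mb) :=
        PySem.List.remove?_eq_some_erase b mb (PySem.List.max?_mem hmb)
      have hmapa : List.map (fun i : Int => i) a = a := List.map_id' a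
      have hmapb : List.map (fun i : Int => i) b = b := List.map_id' b
      rw [greater_than.eq_def, sortD_cons_max a ma hma, sortD_cons_max b mb hmb]
      simp only [if_neg ha, if_neg hb]
      split
      · rename_i ma' mb' h1 h2
        rw [hmapa] at h1
        rw [hmapb] at h2
        have e1 : ma' = ma := Option.some.inj (h1.symm.trans hma)
        have e2 : mb' = mb := Option.some.inj (h2.symm.trans hmb)
        rw [e1, e2]
        by_cases hgt : ma > mb
        · simp [pyListGt, hgt]
        · by_cases heq : ma = mb
          · subst heq
            rw [if_neg hgt, if_pos rfl]
            split
            · rename_i a2 b2 h3 h4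
              rw [hmapa] at h3
              rw [hmapb] at h4
              have e3 : a2 = a.erase ma := Option.some.inj (h3.symm.trans hra)
              have e4 : b2 = b.erase ma := Option.some.inj (h4.symm.trans hrb)
              rw [e3, e4]
              have hlen : (a.erase ma).length = k := by
                have := List.length_erase_of_mem (PySem.List.max?_mem hma)
                omega
              rw [ih (a.erase ma) (b.erase ma) hlen]
              simp [pyListGt]
            · rename_i hcontra
              exact (hcontra (a.erase ma) (b.erase ma)
                (by rw [hmapa]; exact hra) (by rw [hmapb]; exact hrb)).elim
          · have hlt : ma < mb := lt_of_le_of_ne (not_lt.mp hgt) heq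
            simp [pyListGt, hgt, heq, hlt]
      · rename_i hcontra
        exact (hcontra ma mb (by rw [hmapa]; exact hma) (by rw [hmapb]; exact hmb)).elim

-- ===== VERDICT (by name: the statement is the Claim_ definition above) =====
theorem greater_than_spec : Claim_equal_greater_than := by
  intro a b _
  unfold Spec_greater_than greater_than_alt
  exact greater_than_eq_pyListGt a.length a b rfl
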